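-- pv_equiv track=rewrite | github.com/ucfnlp/sent-fusion-transformers | util.py | create_token_to_indices
-- ===== SOURCE A (Python) =====
-- def create_token_to_indices(lst):
--     token_to_indices = {}
--     for token_idx, token in enumerate(lst):
--         if token in token_to_indices:
--             token_to_indices[token].append(token_idx)
--         else:
--             token_to_indices[token] = [token_idx]
--     return token_to_indices
-- ===== SOURCE B (Python) =====
-- def create_token_to_indices(lst):
--     distinct = dict.fromkeys(lst)
--     return {token: [i for i, x in enumerate(lst) if x == token]
--             for token in distinct}
-- ===== Notes on version B (the rewrite author's own statement) =====
-- stated objective: alternative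
-- what changed: Replaces A's single accumulating pass (dict of growing lists) with first collecting the distinct tokens via dict.fromkeys and then one enumerate-scan per distinct token in a dict comprehension.
import Mathlib
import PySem

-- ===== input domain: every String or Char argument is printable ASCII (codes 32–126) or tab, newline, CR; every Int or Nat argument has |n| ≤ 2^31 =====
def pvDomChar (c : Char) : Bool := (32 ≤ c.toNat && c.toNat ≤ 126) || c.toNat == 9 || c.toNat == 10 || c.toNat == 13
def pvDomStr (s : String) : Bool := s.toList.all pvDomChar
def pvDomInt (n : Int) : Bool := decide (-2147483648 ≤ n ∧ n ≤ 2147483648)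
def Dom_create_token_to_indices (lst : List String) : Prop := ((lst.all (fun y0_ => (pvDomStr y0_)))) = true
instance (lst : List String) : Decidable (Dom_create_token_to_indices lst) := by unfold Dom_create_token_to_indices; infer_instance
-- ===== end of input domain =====

-- B builds the same token→indices dict by a different traversal: distinct tokens first,
-- then one index scan per distinct token (objective: alternative; same return value).

-- ===== PORT A =====
def create_token_to_indices (lst : List String) : List (String × List Int) :=
  ((PySem.List.enumerate lst).foldl
    (fun d p =>
      if d.contains p.2 then d.insert p.2 (d.getD p.2 [] ++ [p.1])
      else d.insert p.2 [p.1])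
    PySem.Dict.empty).items

-- ===== PORT B =====
def create_token_to_indices_alt (lst : List String) : List (String × List Int) :=
  (PySem.Set.ofList lst).map
    (fun t => (t, ((PySem.List.enumerate lst).filter (fun p => p.2 == t)).map (·.1)))

-- ===== PRECONDITION & SPEC =====
def Spec_create_token_to_indices (lst : List String) (out : List (String × List Int)) : Prop := out = create_token_to_indices_alt lst
instance (lst : List String) (out : List (String × List Int)) : Decidable (Spec_create_token_to_indices lst out) := by unfold Spec_create_token_to_indices; infer_instance

-- ===== CLAIM (what is proved, stated in full; the proofs are below) =====
def Claim_equal_create_token_to_indices : Prop := ∀ (lst : List String), Dom_create_token_to_indices lst → Spec_create_token_to_indices lst (create_token_to_indices lst)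

-- ===== LEMMAS AND PROOFS =====

-- A's loop body (branch on membership) is pointwise the Dict.modify append step.
theorem pvStep_eq_modify (d : PySem.Dict String (List Int)) (p : Int × String) :
    (if d.contains p.2 then d.insert p.2 (d.getD p.2 [] ++ [p.1])
     else d.insert p.2 [p.1])
    = d.modify p.2 [] (· ++ [p.1]) := by
  by_cases h : d.contains p.2
  · simp [h, PySem.Dict.modify]
  · simp at h
    have hg : d.getD p.2 ([] : List Int) = [] := by
      simp [PySem.Dict.getD_of_not_contains, h]
    simp [h, PySem.Dict.modify, hg]

theorem pvFold_eq_modify (lst : List String) :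
    (PySem.List.enumerate lst).foldl
      (fun d p =>
        if d.contains p.2 then d.insert p.2 (d.getD p.2 [] ++ [p.1])
        else d.insert p.2 [p.1])
      PySem.Dict.empty
    = (PySem.List.enumerate lst).foldl
        (fun d p => d.modify p.2 [] (· ++ [p.1])) PySem.Dict.empty := by
  congr 1
  funext d p
  exact pvStep_eq_modify d p

theorem create_token_to_indices_spec : Claim_equal_create_token_to_indices := by
  intro lst _
  unfold Spec_create_token_to_indices create_token_to_indices create_token_to_indices_alt
  rw [pvFold_eq_modify]
  set d := (PySem.List.enumerate lst).foldl
      (fun d p => d.modify p.2 [] (· ++ [p.1])) PySem.Dict.empty with hd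
  have hswap : d = ((PySem.List.enumerate lst).map Prod.swap).foldl
      (fun d p => d.modify p.1 [] (· ++ [p.2])) PySem.Dict.empty := by
    rw [List.foldl_map]; rfl
  have hnd : d.keys.Nodup := by
    rw [hswap]
    exact PySem.Dict.nodup_keys_foldl_modify_key _ Prod.fst [] _ _ (by simp [PySem.Dict.keys, PySem.Dict.empty])
  have hkeys : d.keys = PySem.Set.ofList lst := by
    rw [hswap]
    rw [PySem.Dict.keys_foldl_modify_key]
    simp [PySem.Dict.keys, PySem.Dict.empty, PySem.Set.update_nil_left,
      Function.comp_def, Prod.swap, PySem.List.map_snd_enumerate]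
  have hget : ∀ t, d.getD t [] =
      ((PySem.List.enumerate lst).filter (fun p => p.2 == t)).map (·.1) := by
    intro t
    rw [hswap, PySem.Dict.getD_foldl_modify_append]
    simp [PySem.Dict.getD_empty, List.filter_map, Function.comp_def]
  rw [PySem.Dict.items_eq_map_keys d hnd [], hkeys]
  exact List.map_congr_left fun t _ => by rw [hget t]
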